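-- pv_equiv track=rewrite | github.com/ivoshemi-sys/oixa-protocol | server/database.py | _sqlite_to_pg
-- ===== SOURCE A (Python) =====
-- def _sqlite_to_pg(sql: str) -> str:
--     """Convert SQLite-style ? placeholders to asyncpg $1, $2, ..."""
--     result, counter = [], 1
--     for ch in sql:
--         if ch == "?":
--             result.append(f"${counter}")
--             counter += 1
--         else:
--             result.append(ch)
--     return "".join(result)
-- ===== SOURCE B (Python) =====
-- def _sqlite_to_pg(sql: str) -> str:
--     """Convert SQLite-style ? placeholders to asyncpg $1, $2, ..."""
--     parts = sql.split("?")
--     out = [parts[0]]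
--     for i, seg in enumerate(parts[1:], 1):
--         out.append(f"${i}")
--         out.append(seg)
--     return "".join(out)
-- ===== Notes on version B (the rewrite author's own statement) =====
-- stated objective: simpler
-- what changed: B splits the string on the placeholder character once and interleaves generated $i tokens between the segments, instead of A's per-character scan with a running counter.
import Mathlib
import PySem

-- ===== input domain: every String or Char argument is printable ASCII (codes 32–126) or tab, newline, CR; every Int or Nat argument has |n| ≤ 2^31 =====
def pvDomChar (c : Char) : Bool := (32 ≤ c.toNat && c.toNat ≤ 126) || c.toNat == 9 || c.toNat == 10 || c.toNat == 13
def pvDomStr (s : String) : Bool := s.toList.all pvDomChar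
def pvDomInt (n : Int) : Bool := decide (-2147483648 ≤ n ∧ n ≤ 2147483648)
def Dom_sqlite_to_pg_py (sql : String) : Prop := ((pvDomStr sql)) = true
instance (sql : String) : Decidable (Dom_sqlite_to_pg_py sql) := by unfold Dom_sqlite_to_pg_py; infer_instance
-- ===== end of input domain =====

-- B splits the SQL string on '?' once and interleaves generated $i placeholders between
-- the segments, instead of A's character-by-character scan with a running counter (simpler).


-- ===== PORT A =====
-- A: for ch in sql: append "$counter" (and bump counter) on '?', else append ch; join at the end.
def pvAStep (st : List (List Char) × Int) (ch : Char) : List (List Char) × Int :=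
  if ch == '?' then (st.1 ++ [('$' :: (PySem.Int.toStr st.2).toList)], st.2 + 1)
  else (st.1 ++ [[ch]], st.2)

def sqlite_to_pg_py (sql : String) : String :=
  let st := sql.toList.foldl pvAStep ([], 1)
  String.mk (PySem.Chars.join [] st.1)

-- ===== PORT B =====
-- B: parts = sql.split("?"); emit parts[0], then "$i" + seg for each later segment.
def pvBGo : List (List Char) → Int → List Char
  | [], _ => []
  | seg :: rest, i => ('$' :: (PySem.Int.toStr i).toList) ++ seg ++ pvBGo rest (i + 1)

def sqlite_to_pg_py_alt (sql : String) : String :=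
  match sql.toList.splitOn '?' with
  | [] => ""
  | p0 :: rest => String.mk (p0 ++ pvBGo rest 1)

-- ===== PRECONDITION & SPEC =====
def Spec_sqlite_to_pg_py (sql : String) (out : String) : Prop := out = sqlite_to_pg_py_alt sql
instance (sql : String) (out : String) : Decidable (Spec_sqlite_to_pg_py sql out) := by unfold Spec_sqlite_to_pg_py; infer_instance

-- ===== CLAIM (what is proved, stated in full; the proofs are below) =====
def Claim_equal_sqlite_to_pg_py : Prop := ∀ (sql : String), Dom_sqlite_to_pg_py sql → Spec_sqlite_to_pg_py sql (sqlite_to_pg_py sql)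

-- ===== LEMMAS AND PROOFS =====

/-- The common characterisation both ports are reduced to. -/
def pvG : List Char → Int → List Char
  | [], _ => []
  | ch :: t, c =>
    if ch == '?' then ('$' :: (PySem.Int.toStr c).toList) ++ pvG t (c + 1)
    else ch :: pvG t c

theorem pvJoinNil (l : List (List Char)) : PySem.Chars.join [] l = l.flatten := by
  induction l with
  | nil => rfl
  | cons h t ih =>
    simp only [PySem.Chars.join, List.intercalate] at *
    cases t with
    | nil => simp
    | cons h' t' => simpa [List.intersperse] using ih

theorem pvA_eq_g (cs : List Char) : ∀ (acc : List (List Char)) (c : Int),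
    PySem.Chars.join [] (cs.foldl pvAStep (acc, c)).1
      = PySem.Chars.join [] acc ++ pvG cs c := by
  induction cs with
  | nil => intro acc c; simp [pvG]
  | cons h t ih =>
    intro acc c
    by_cases hq : h = '?'
    · subst hq
      simp only [List.foldl_cons, pvAStep, beq_self_eq_true, if_true]
      rw [ih, pvG]
      simp [pvJoinNil]
    · simp only [List.foldl_cons, pvAStep, beq_iff_eq, if_neg hq]
      rw [ih, pvG]
      simp [pvJoinNil, hq]

theorem pvSplitOn_ne_nil (cs : List Char) : cs.splitOn '?' ≠ [] := by
  simp [List.splitOn, List.splitOnP_ne_nil]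

theorem pvB_eq_g (cs : List Char) : ∀ (c : Int),
    (match cs.splitOn '?' with
     | [] => []
     | p0 :: rest => p0 ++ pvBGo rest c) = pvG cs c := by
  induction cs with
  | nil => intro c; simp [List.splitOn, pvG, pvBGo]
  | cons h t ih =>
    intro c
    by_cases hq : h = '?'
    · subst hq
      rw [List.splitOn, List.splitOnP_cons]
      simp only [beq_self_eq_true, if_true]
      have := ih (c + 1)
      rcases hne : t.splitOn '?' with _ | ⟨p0, rest⟩
      · exact absurd hne (pvSplitOn_ne_nil t)
      · have hne' : List.splitOn '?' t = p0 :: rest := hne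
        rw [hne'] at this
        have this' : p0 ++ pvBGo rest (c + 1) = pvG t (c + 1) := this
        simp only [List.splitOn] at hne'
        rw [hne']
        simp only [pvBGo, List.nil_append, pvG, beq_self_eq_true, if_true]
        rw [← this']
        simp
    · rw [List.splitOn, List.splitOnP_cons]
      simp only [beq_iff_eq, if_neg hq]
      have := ih c
      rcases hne : t.splitOn '?' with _ | ⟨p0, rest⟩
      · exact absurd hne (pvSplitOn_ne_nil t)
      · have hne' : List.splitOn '?' t = p0 :: rest := hne
        rw [hne'] at this
        have this' : p0 ++ pvBGo rest c = pvG t c := this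
        simp only [List.splitOn] at hne'
        rw [hne']
        simp only [List.modifyHead, pvG, beq_iff_eq, if_neg hq, List.cons_append]
        rw [← this']

-- ===== VERDICT (by name: the statement is the Claim_ definition above) =====
theorem sqlite_to_pg_py_spec : Claim_equal_sqlite_to_pg_py := by
  intro sql _
  unfold Spec_sqlite_to_pg_py sqlite_to_pg_py sqlite_to_pg_py_alt
  have hA := pvA_eq_g sql.toList [] 1
  have hA' : PySem.Chars.join [] (sql.toList.foldl pvAStep ([], 1)).1 = pvG sql.toList 1 := by
    rw [hA]; rfl
  have hB := pvB_eq_g sql.toList 1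
  rcases hne : sql.toList.splitOn '?' with _ | ⟨p0, rest⟩
  · exact absurd hne (pvSplitOn_ne_nil sql.toList)
  · rw [hne] at hB
    have hB' : p0 ++ pvBGo rest 1 = pvG sql.toList 1 := hB
    exact congrArg String.mk (hA'.trans hB'.symm)
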